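-- pv_equiv track=rewrite | github.com/orwithout/hugo_babel | tools/make_udc.py | ensure_parent
-- ===== SOURCE A (Python) =====
-- def ensure_parent(code, codes):
--     if '.' in code:
--         p = code.rsplit('.',1)[0]
--     elif len(code)>1:
--         p = code[:-1]
--     else:
--         return None
--     return p if p in codes else ensure_parent(p, codes)
-- ===== SOURCE B (Python) =====
-- def ensure_parent(code, codes):
--     while True:
--         if '.' in code:
--             p = code.rsplit('.', 1)[0]
--         elif len(code) > 1:
--             p = code[:-1]
--         else:
--             return None
--         if p in codes:
--             return p
--         code = p
-- ===== Notes on version B (the rewrite author's own statement) =====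
-- stated objective: simpler
-- what changed: Replaced the self-recursive call with an iterative while-loop (compute parent, test membership, continue), keeping the dot-branch priority and termination behaviour.
import Mathlib
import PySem

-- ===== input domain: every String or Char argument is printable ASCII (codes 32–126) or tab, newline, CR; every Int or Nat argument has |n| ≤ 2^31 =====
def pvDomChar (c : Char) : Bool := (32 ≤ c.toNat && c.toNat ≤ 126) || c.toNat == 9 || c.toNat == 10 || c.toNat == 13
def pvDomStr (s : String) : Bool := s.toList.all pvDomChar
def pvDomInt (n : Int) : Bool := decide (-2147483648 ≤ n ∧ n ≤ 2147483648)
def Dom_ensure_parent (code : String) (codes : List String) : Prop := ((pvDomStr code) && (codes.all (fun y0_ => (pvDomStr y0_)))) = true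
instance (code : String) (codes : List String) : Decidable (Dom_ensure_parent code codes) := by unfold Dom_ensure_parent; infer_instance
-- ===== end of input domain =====

-- B rewrites A's self-recursion as an iterative loop (compute parent, test membership, continue); same values, objective: simpler.

-- ===== PORT A =====
-- code.rsplit('.', 1)[0]: everything before the LAST '.'; exact when '.' ∈ l (hand port, no PySem rsplit).
def pvRsplitDotHead (l : List Char) : List Char := ((l.reverse.dropWhile (· ≠ '.')).drop 1).reverse

-- termination helper, cited by both ports' decreasing_by
theorem pvRsplitDotHead_length_lt (l : List Char) (h : '.' ∈ l) :
    (pvRsplitDotHead l).length < l.length := by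
  unfold pvRsplitDotHead
  have hne : l.reverse.dropWhile (· ≠ '.') ≠ [] := by
    intro hnil
    have := (List.dropWhile_eq_nil_iff).1 hnil '.' (by simpa using h)
    simp at this
  have h1 : 1 ≤ (l.reverse.dropWhile (· ≠ '.')).length := by
    have := List.length_pos_of_ne_nil hne; omega
  have h2 : (l.reverse.dropWhile (· ≠ '.')).length ≤ l.length := by
    simpa using List.length_dropWhile_le (· ≠ '.') l.reverse
  rw [List.length_reverse, List.length_drop]
  omega

-- literal transliteration of A: branch on '.', else length, else None; recurse when p ∉ codes
def ensureParentA (l : List Char) (cs : List (List Char)) : Option (List Char) :=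
  if h : '.' ∈ l then  -- 'h' is cited only in decreasing_by
    let p := pvRsplitDotHead l
    if p ∈ cs then some p else ensureParentA p cs
  else if 1 < l.length then
    let p := l.dropLast
    if p ∈ cs then some p else ensureParentA p cs
  else none
termination_by l.length
decreasing_by
  · exact pvRsplitDotHead_length_lt l h
  · simp [List.length_dropLast]; omega

def ensure_parent (code : String) (codes : List String) : Option String :=
  (ensureParentA code.toList (codes.map String.toList)).map String.ofList

-- ===== PORT B =====
-- one loop-body step of Source B: the Option parent (None = 'return None')
def parentStep (l : List Char) : Option (List Char) :=
  if '.' ∈ l then some (pvRsplitDotHead l)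
  else if 1 < l.length then some l.dropLast
  else none

theorem parentStep_length_lt (l p : List Char) (h : parentStep l = some p) :
    p.length < l.length := by
  unfold parentStep at h
  split_ifs at h with h1 h2
  · cases h; exact pvRsplitDotHead_length_lt l h1
  · cases h; simp [List.length_dropLast]; omega

-- Source B's 'while True' loop as a tail recursion on the mutable variable
def ensureParentLoop (l : List Char) (cs : List (List Char)) : Option (List Char) :=
  match h : parentStep l with  -- 'h' is cited only in decreasing_by
  | none => none
  | some p => if p ∈ cs then some p else ensureParentLoop p cs
termination_by l.length
decreasing_by exact parentStep_length_lt l p h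

def ensure_parent_alt (code : String) (codes : List String) : Option String :=
  (ensureParentLoop code.toList (codes.map String.toList)).map String.ofList

-- ===== PRECONDITION & SPEC =====
def Spec_ensure_parent (code : String) (codes : List String) (out : Option String) : Prop := out = ensure_parent_alt code codes
instance (code : String) (codes : List String) (out : Option String) : Decidable (Spec_ensure_parent code codes out) := by unfold Spec_ensure_parent; infer_instance

-- ===== CLAIM (what is proved, stated in full; the proofs are below) =====
def Claim_equal_ensure_parent : Prop := ∀ (code : String) (codes : List String), Dom_ensure_parent code codes → Spec_ensure_parent code codes (ensure_parent code codes)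

-- ===== LEMMAS AND PROOFS =====
theorem ensureParentA_step (l : List Char) (cs : List (List Char)) :
    ensureParentA l cs =
      match parentStep l with
      | none => none
      | some p => if p ∈ cs then some p else ensureParentA p cs := by
  rw [ensureParentA]
  unfold parentStep
  split_ifs with h1 h2 <;> rfl

theorem ensureParentLoop_step (l : List Char) (cs : List (List Char)) :
    ensureParentLoop l cs =
      match parentStep l with
      | none => none
      | some p => if p ∈ cs then some p else ensureParentLoop p cs := by
  rw [ensureParentLoop]
  split <;> rename_i heq <;> simp [heq]

theorem ensureParentA_eq_loop (l : List Char) (cs : List (List Char)) :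
    ensureParentA l cs = ensureParentLoop l cs := by
  induction l using (measure List.length).wf.induction with
  | _ l ih =>
    rw [ensureParentA_step, ensureParentLoop_step]
    cases hp : parentStep l with
    | none => rfl
    | some p =>
      by_cases hm : p ∈ cs
      · simp [hm]
      · simp only [if_neg hm]
        exact ih p (parentStep_length_lt l p hp)

-- ===== VERDICT (by name: the statement is the Claim_ definition above) =====
theorem ensure_parent_spec : Claim_equal_ensure_parent := by
  intro code codes _
  unfold Spec_ensure_parent ensure_parent ensure_parent_alt
  rw [ensureParentA_eq_loop]
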